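-- pv_equiv track=rewrite | github.com/nottalha/Compiler-construction-project | tokenization.py | detect_identifiers
-- ===== SOURCE A (Python) =====
-- keywords = {"scanf","%d","#include","main()","<stdio.h>","cout",
-- "auto","break","case","char","const","continue","default","do",
-- "double","else","enum","extern","float","for","goto",
-- "if","int","long","register","return","short","signed",
-- "sizeof","static","struct","switch","typedef","union",
-- "unsigned","void","volatile","while","printf","else",
-- "namespace","std","<iostream>"}
--
-- operators = {"+","-","*","/","<",">","=","<=",">=","==","!=","++","--","%"}
--
-- delimiters = {'(',')','{','}','[',']','"',"'",';','#',',',''}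
--
-- comments = ['##', '###', 'comment', 'commentEnd']
--
-- def detect_keywords(text):
-- 	arr = []
-- 	for word in text:
-- 		if word in keywords:
-- 			arr.append(word)
-- 	return list(set(arr))
--
-- def detect_comment(text):
-- 	arr = []
-- 	str1 = ''
-- 	count = 0
--
-- 	for word in text:
-- 		count=count +1
-- 		if(word == comments[0]):
-- 			for f in text[count:]:
-- 				if(f == comments[1]):
-- 						break
-- 				else:
-- 					str1 = str1 +" "+ f
-- 					continue
-- 			arr.append(str1)
-- 			str1 = " "
--
--
-- 	return list(set(arr))
--
-- def listingOfComment(text):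
-- 	arr = []
--
-- 	for word in text:
-- 			for w in word.split():
-- 				arr.append(w)
-- 	return list(set(arr))
--
-- def detect_operators(text):
-- 	arr = []
-- 	for word in text:
-- 		if word in operators:
-- 			arr.append(word)
-- 	return list(set(arr))
--
-- def detect_delimiters(text):
-- 	arr = []
-- 	for word in text:
-- 		if word in delimiters:
-- 			arr.append(word)
-- 	return list(set(arr))
--
-- def detect_num(text):
-- 	arr = []
-- 	for word in text:
-- 		try:
-- 			a = int(word)
-- 			arr.append(word)
-- 		except:
-- 			pass
-- 	return list(set(arr))
--
-- def detect_identifiers(text):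
-- 	k = detect_keywords(text)
-- 	o = detect_operators(text)
-- 	d = detect_delimiters(text)
-- 	n = detect_num(text)
-- 	m = listingOfComment(detect_comment(text))
-- 	not_ident = k + o + d + n + m
-- 	arr = []
-- 	for word in text:
-- 		if word not in not_ident:
-- 			arr.append(word)
-- 	return arr
-- ===== SOURCE B (Python) =====
-- keywords = {"scanf","%d","#include","main()","<stdio.h>","cout",
-- "auto","break","case","char","const","continue","default","do",
-- "double","else","enum","extern","float","for","goto",
-- "if","int","long","register","return","short","signed",
-- "sizeof","static","struct","switch","typedef","union",
-- "unsigned","void","volatile","while","printf",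
-- "namespace","std","<iostream>"}
--
-- operators = {"+","-","*","/","<",">","=","<=",">=","==","!=","++","--","%"}
--
-- delimiters = {'(',')','{','}','[',']','"',"'",';','#',',',''}
--
--
-- def _is_int(word):
--     try:
--         int(word)
--         return True
--     except ValueError:
--         return False
--
--
-- def detect_identifiers(text):
--     # one linear state-machine pass collects every word inside a ##..### comment
--     # region (a '##' seen while a region is open counts as a comment word itself)
--     comment_words = set()
--     in_comment = False
--     for word in text:
--         if in_comment:
--             if word == "###":
--                 in_comment = False
--             else:
--                 comment_words.update(word.split())
--         elif word == "##":
--             in_comment = True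
--     # one classifying pass keeps only the unclassified words, in order
--     out = []
--     for word in text:
--         if not (word in keywords or word in operators or word in delimiters
--                 or _is_int(word) or word in comment_words):
--             out.append(word)
--     return out
-- ===== Notes on version B (the rewrite author's own statement) =====
-- stated objective: alternative
-- what changed: Replaces five independent category scans plus a per-'##' rescan of the tail and a final list-membership filter with one linear state-machine pass that collects comment words into a set and one classifying pass over the words.
import Mathlib
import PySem

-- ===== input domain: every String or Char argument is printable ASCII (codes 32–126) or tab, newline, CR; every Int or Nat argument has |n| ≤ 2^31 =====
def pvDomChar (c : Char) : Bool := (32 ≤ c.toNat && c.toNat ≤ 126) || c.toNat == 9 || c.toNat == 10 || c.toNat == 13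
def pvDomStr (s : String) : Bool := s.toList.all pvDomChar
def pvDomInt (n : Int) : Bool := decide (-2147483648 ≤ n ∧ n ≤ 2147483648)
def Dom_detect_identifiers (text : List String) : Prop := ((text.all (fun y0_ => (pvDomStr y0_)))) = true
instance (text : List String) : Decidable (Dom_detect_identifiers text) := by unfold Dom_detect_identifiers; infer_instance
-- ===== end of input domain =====

-- B replaces A's five category scans, per-'##' comment rescan and list-membership filter by one
-- state-machine pass building a comment-word set plus one classifying pass (alternative algorithm).


-- ===== PORT A =====
def pyKeywords : PySem.Set String := PySem.Set.ofList
  ["scanf","%d","#include","main()","<stdio.h>","cout",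
   "auto","break","case","char","const","continue","default","do",
   "double","else","enum","extern","float","for","goto",
   "if","int","long","register","return","short","signed",
   "sizeof","static","struct","switch","typedef","union",
   "unsigned","void","volatile","while","printf","else",
   "namespace","std","<iostream>"]

def pyOperators : PySem.Set String := PySem.Set.ofList
  ["+","-","*","/","<",">","=","<=",">=","==","!=","++","--","%"]

def pyDelimiters : PySem.Set String := PySem.Set.ofList
  ["(",")","{","}","[","]","\"","'",";","#",",",""]

def pyComments : List String := ["##", "###", "comment", "commentEnd"]

def detect_keywords (text : List String) : List String :=
  PySem.Set.ofList (text.foldl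
    (fun arr word => if word ∈ pyKeywords then arr ++ [word] else arr) [])

-- the inner 'for f in text[count:]: if f == comments[1]: break else: str1 = str1 + " " + f'
def dcInner : List String → String → String
  | [], str1 => str1
  | f :: rest, str1 =>
    if f = PySem.List.pyGetD pyComments 1 "" then str1
    else dcInner rest (str1 ++ " " ++ f)

def detect_comment (text : List String) : List String :=
  let st := text.foldl
    (fun (st : List String × String × Int) word =>
      let count := st.2.2 + 1
      if word = PySem.List.pyGetD pyComments 0 "" then
        (st.1 ++ [dcInner (PySem.List.slice text (some count) none) st.2.1], " ", count)
      else (st.1, st.2.1, count))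
    ([], "", 0)
  PySem.Set.ofList st.1

def listingOfComment (text : List String) : List String :=
  PySem.Set.ofList (text.foldl (fun arr word => arr ++ PySem.Str.split₀ word) [])

def detect_operators (text : List String) : List String :=
  PySem.Set.ofList (text.foldl
    (fun arr word => if word ∈ pyOperators then arr ++ [word] else arr) [])

def detect_delimiters (text : List String) : List String :=
  PySem.Set.ofList (text.foldl
    (fun arr word => if word ∈ pyDelimiters then arr ++ [word] else arr) [])

def detect_num (text : List String) : List String :=
  PySem.Set.ofList (text.foldl
    (fun arr word =>
      match PySem.Int.ofStr? word with
      | some _ => arr ++ [word]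
      | none => arr) [])

def detect_identifiers (text : List String) : List String :=
  let k := detect_keywords text
  let o := detect_operators text
  let d := detect_delimiters text
  let n := detect_num text
  let m := listingOfComment (detect_comment text)
  let not_ident := k ++ o ++ d ++ n ++ m
  text.foldl (fun arr word => if word ∈ not_ident then arr else arr ++ [word]) []

-- ===== PORT B =====
def detect_identifiers_alt (text : List String) : List String :=
  let st := text.foldl
    (fun (st : PySem.Set String × Bool) word =>
      if st.2 then
        if word = "###" then (st.1, false)
        else (PySem.Set.update st.1 (PySem.Str.split₀ word), st.2)
      else if word = "##" then (st.1, true)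
      else st)
    (PySem.Set.empty, false)
  let comment_words := st.1
  text.foldl
    (fun out word =>
      if word ∈ pyKeywords ∨ word ∈ pyOperators ∨ word ∈ pyDelimiters
          ∨ (PySem.Int.ofStr? word).isSome ∨ word ∈ comment_words
      then out
      else out ++ [word]) []

-- ===== PRECONDITION & SPEC =====
def Spec_detect_identifiers (text : List String) (out : List String) : Prop := out = detect_identifiers_alt text
instance (text : List String) (out : List String) : Decidable (Spec_detect_identifiers text out) := by unfold Spec_detect_identifiers; infer_instance

-- ===== CLAIM (what is proved, stated in full; the proofs are below) =====
def Claim_equal_detect_identifiers : Prop := ∀ (text : List String), Dom_detect_identifiers text → Spec_detect_identifiers text (detect_identifiers text)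

-- ===== LEMMAS AND PROOFS =====

-- words of a string, as both Pythons split them
def wordsStr (s : String) : List String := PySem.Str.split₀ s

-- the comment words A extracts, region by region
def mA : List String → List String
  | [] => []
  | w :: r =>
    if w = "##" then (r.takeWhile (· ≠ "###")).flatMap wordsStr ++ mA r
    else mA r

-- the comment words B's state machine extracts
def cwSpec : List String → Bool → List String
  | [], _ => []
  | w :: r, true => if w = "###" then cwSpec r false else wordsStr w ++ cwSpec r true
  | w :: r, false => if w = "##" then cwSpec r true else cwSpec r false

theorem pyComments0 : PySem.List.pyGetD pyComments 0 "" = "##" := by decide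
theorem pyComments1 : PySem.List.pyGetD pyComments 1 "" = "###" := by decide

theorem split0_go_acc (s : List Char) : ∀ (cur : List Char) (acc : List (List Char)),
    PySem.Chars.split₀.go s cur acc = acc.reverse ++ PySem.Chars.split₀.go s cur [] := by
  induction s with
  | nil => intro cur acc; simp [PySem.Chars.split₀.go]; split <;> simp
  | cons c rest ih =>
    intro cur acc
    simp only [PySem.Chars.split₀.go]
    split
    · split
      · exact ih [] acc
      · rw [ih [] (cur.reverse :: acc), ih [] [cur.reverse]]; simp
    · exact ih (c :: cur) acc

theorem split0_go_space (b : List Char) : ∀ (a cur : List Char) (acc : List (List Char)),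
    PySem.Chars.split₀.go (a ++ ' ' :: b) cur acc
      = PySem.Chars.split₀.go a cur acc ++ PySem.Chars.split₀.go b [] [] := by
  intro a
  induction a with
  | nil =>
    intro cur acc
    simp only [List.nil_append, PySem.Chars.split₀.go]
    have hsp : PySem.Chars.isspace ' ' = true := by decide
    rw [hsp]; simp only [if_true]
    split
    · rw [split0_go_acc]
    · rw [split0_go_acc]
  | cons c a' ih =>
    intro cur acc
    simp only [List.cons_append, PySem.Chars.split₀.go]
    split
    · split
      · exact ih [] acc
      · exact ih [] _
    · exact ih (c :: cur) acc

theorem split0_space (a b : List Char) :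
    PySem.Chars.split₀ (a ++ ' ' :: b) = PySem.Chars.split₀ a ++ PySem.Chars.split₀ b := by
  simp only [PySem.Chars.split₀]
  exact split0_go_space b a [] []

theorem wordsStr_append_space (s f : String) :
    wordsStr (s ++ " " ++ f) = wordsStr s ++ wordsStr f := by
  simp only [wordsStr, PySem.Str.split₀, String.toList_append]
  have h : (" " : String).toList = [' '] := by decide
  rw [h, List.append_assoc]
  simp [split0_space]

theorem wordsStr_dcInner (l : List String) : ∀ (s : String),
    wordsStr (dcInner l s) = wordsStr s ++ (l.takeWhile (· ≠ "###")).flatMap wordsStr := by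
  induction l with
  | nil => intro s; simp [dcInner]
  | cons f rest ih =>
    intro s
    simp only [dcInner, pyComments1, List.takeWhile_cons]
    by_cases hf : f = "###"
    · simp [hf]
    · simp only [hf, ite_false, decide_not]
      rw [ih]
      simp [wordsStr_append_space]

theorem cwSpec_true_iff (r : List String) : ∀ (w : String),
    w ∈ cwSpec r true ↔ w ∈ (r.takeWhile (· ≠ "###")).flatMap wordsStr ∨ w ∈ cwSpec r false := by
  induction r with
  | nil => intro w; simp [cwSpec]
  | cons x r' ih =>
    intro w
    by_cases hx : x = "###"
    · simp [cwSpec, hx]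
    · have h := ih w
      by_cases hx2 : x = "##" <;>
        simp [cwSpec, hx, hx2, -List.mem_flatMap] at h ⊢ <;> rw [h] <;> tauto

theorem mem_mA_iff (l : List String) : ∀ (w : String), w ∈ mA l ↔ w ∈ cwSpec l false := by
  induction l with
  | nil => intro w; simp [mA, cwSpec]
  | cons x r ih =>
    intro w
    by_cases hx : x = "##"
    · have h := ih w
      have h2 := cwSpec_true_iff r w
      simp only [mA, cwSpec, hx, ite_true, List.mem_append] at *
      rw [h2, h]
    · simp [mA, cwSpec, hx, ih]

theorem afold_mem (r : List String) : ∀ (text p arr : List String) (str1 : String) (w : String),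
    text = p ++ r → wordsStr str1 = [] →
    ((∃ s ∈ (r.foldl
      (fun (st : List String × String × Int) word =>
        let count := st.2.2 + 1
        if word = PySem.List.pyGetD pyComments 0 "" then
          (st.1 ++ [dcInner (PySem.List.slice text (some count) none) st.2.1], " ", count)
        else (st.1, st.2.1, count))
      (arr, str1, (p.length : Int))).1, w ∈ wordsStr s)
      ↔ (∃ s ∈ arr, w ∈ wordsStr s) ∨ w ∈ mA r) := by
  induction r with
  | nil => intro text p arr str1 w htext hstr; simp [mA]
  | cons word r' ih =>
    intro text p arr str1 w htext hstr
    by_cases hw : word = "##"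
    · subst hw
      have hslice : PySem.List.slice text (some ((p.length : Int) + 1)) none = r' := by
        have h1 : ((p.length : Int) + 1) = ((p.length + 1 : Nat) : Int) := by omega
        rw [h1, PySem.List.slice_from_natCast]
        have h2 : text = (p ++ ["##"]) ++ r' := by simp [htext]
        rw [h2]
        have hl : (p ++ ["##"]).length = p.length + 1 := by simp
        rw [← hl, List.drop_left]
      have hcast : ((p.length : Int) + 1) = (((p ++ ["##"]).length : Nat) : Int) := by
        simp
      simp only [List.foldl_cons, pyComments0, if_true] at ih ⊢
      rw [hslice, hcast,
        ih text (p ++ ["##"]) (arr ++ [dcInner r' str1]) " " w (by simp [htext]) (by decide)]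
      simp only [mA, ite_true, List.mem_append, List.mem_singleton]
      constructor
      · rintro (⟨s, hs, hws⟩ | hm)
        · rcases hs with hs | hs
          · exact Or.inl ⟨s, hs, hws⟩
          · subst hs
            rw [wordsStr_dcInner, hstr] at hws
            refine Or.inr (Or.inl ?_)
            simpa using hws
        · exact Or.inr (Or.inr hm)
      · rintro (⟨s, hs, hws⟩ | hm | hm)
        · exact Or.inl ⟨s, Or.inl hs, hws⟩
        · refine Or.inl ⟨dcInner r' str1, Or.inr rfl, ?_⟩
          rw [wordsStr_dcInner, hstr]
          simpa using hm
        · exact Or.inr hm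
    · have hcast : ((p.length : Int) + 1) = (((p ++ [word]).length : Nat) : Int) := by
        simp
      simp only [List.foldl_cons, pyComments0] at ih ⊢
      rw [if_neg hw, hcast, ih text (p ++ [word]) arr str1 w (by simp [htext]) hstr]
      simp [mA, hw]

theorem detect_comment_mem (text : List String) (w : String) :
    w ∈ listingOfComment (detect_comment text) ↔ w ∈ mA text := by
  unfold listingOfComment detect_comment
  rw [PySem.Set.mem_ofList]
  have hflat : ∀ (l acc : List String),
      l.foldl (fun arr word => arr ++ PySem.Str.split₀ word) acc = acc ++ l.flatMap wordsStr := by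
    intro l
    induction l with
    | nil => intro acc; simp
    | cons x l' ih => intro acc; simp [ih, wordsStr]
  rw [hflat]
  simp only [List.nil_append, List.mem_flatMap]
  have := afold_mem text text [] [] "" w (by simp) (by decide)
  simp only [List.length_nil, Nat.cast_zero] at this
  constructor
  · rintro ⟨s, hs, hws⟩
    rw [PySem.Set.mem_ofList] at hs
    have h2 := this.mp ⟨s, hs, hws⟩
    simpa using h2
  · intro hm
    have h2 := this.mpr (Or.inr hm)
    rcases h2 with ⟨s, hs, hws⟩
    exact ⟨s, (PySem.Set.mem_ofList _ _).mpr hs, hws⟩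

theorem bfold_mem (l : List String) : ∀ (s : PySem.Set String) (b : Bool) (w : String),
    (w ∈ (l.foldl
      (fun (st : PySem.Set String × Bool) word =>
        if st.2 then
          if word = "###" then (st.1, false)
          else (PySem.Set.update st.1 (PySem.Str.split₀ word), st.2)
        else if word = "##" then (st.1, true)
        else st) (s, b)).1 ↔ w ∈ s ∨ w ∈ cwSpec l b) := by
  induction l with
  | nil => intro s b w; simp [cwSpec]
  | cons x r ih =>
    intro s b w
    cases b with
    | true =>
      by_cases hx : x = "###"
      · simp [hx, cwSpec, ih]
      · simp only [List.foldl_cons, if_true, hx, ite_false]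
        rw [ih]
        simp only [cwSpec, hx, ite_false, PySem.Set.mem_update, List.mem_append]
        constructor
        · rintro ((h | h) | h)
          · exact Or.inl h
          · exact Or.inr (Or.inl h)
          · exact Or.inr (Or.inr h)
        · rintro (h | h | h)
          · exact Or.inl (Or.inl h)
          · exact Or.inl (Or.inr h)
          · exact Or.inr h
    | false =>
      by_cases hx : x = "##"
      · simp [hx, cwSpec, ih]
      · simp [hx, cwSpec, ih]

theorem mem_filter_fold (P : String → Prop) [DecidablePred P] (l : List String) :
    ∀ (acc : List String) (w : String),
    (w ∈ l.foldl (fun arr x => if P x then arr ++ [x] else arr) acc ↔ w ∈ acc ∨ (w ∈ l ∧ P w)) := by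
  induction l with
  | nil => intro acc w; simp
  | cons x l' ih =>
    intro acc w
    simp only [List.foldl_cons]
    by_cases hx : P x
    · rw [if_pos hx, ih]
      simp only [List.mem_append, List.mem_cons, List.not_mem_nil, or_false]
      constructor
      · rintro ((h | h) | h)
        · exact Or.inl h
        · subst h; exact Or.inr ⟨Or.inl rfl, hx⟩
        · exact Or.inr ⟨Or.inr h.1, h.2⟩
      · rintro (h | ⟨h1 | h1, h2⟩)
        · exact Or.inl (Or.inl h)
        · exact Or.inl (Or.inr h1)
        · exact Or.inr ⟨h1, h2⟩
    · rw [if_neg hx, ih]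
      simp only [List.mem_cons]
      constructor
      · rintro (h | h)
        · exact Or.inl h
        · exact Or.inr ⟨Or.inr h.1, h.2⟩
      · rintro (h | ⟨h1 | h1, h2⟩)
        · exact Or.inl h
        · subst h1; exact absurd h2 hx
        · exact Or.inr ⟨h1, h2⟩

theorem mem_detect_num (text : List String) (w : String) :
    w ∈ detect_num text ↔ w ∈ text ∧ (PySem.Int.ofStr? w).isSome := by
  unfold detect_num
  rw [PySem.Set.mem_ofList]
  have key : ∀ (l acc : List String),
      (w ∈ l.foldl (fun arr word =>
        match PySem.Int.ofStr? word with
        | some _ => arr ++ [word]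
        | none => arr) acc ↔ w ∈ acc ∨ (w ∈ l ∧ (PySem.Int.ofStr? w).isSome)) := by
    intro l
    induction l with
    | nil => intro acc; simp
    | cons x l' ih =>
      intro acc
      simp only [List.foldl_cons]
      rcases hx : PySem.Int.ofStr? x with _ | n
      · rw [ih]
        simp only [List.mem_cons]
        constructor
        · rintro (h | h)
          · exact Or.inl h
          · exact Or.inr ⟨Or.inr h.1, h.2⟩
        · rintro (h | ⟨h1 | h1, h2⟩)
          · exact Or.inl h
          · rw [h1, hx] at h2; simp at h2
          · exact Or.inr ⟨h1, h2⟩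
      · rw [ih]
        simp only [List.mem_append, List.mem_cons, List.not_mem_nil, or_false]
        constructor
        · rintro ((h | h) | h)
          · exact Or.inl h
          · exact Or.inr ⟨Or.inl h, by rw [h, hx]; rfl⟩
          · exact Or.inr ⟨Or.inr h.1, h.2⟩
        · rintro (h | ⟨h1 | h1, h2⟩)
          · exact Or.inl (Or.inl h)
          · exact Or.inl (Or.inr h1)
          · exact Or.inr ⟨h1, h2⟩
  rw [key]
  simp

theorem mem_detect_if (S : PySem.Set String) (text : List String) (w : String) :
    w ∈ PySem.Set.ofList (text.foldl
      (fun arr word => if word ∈ S then arr ++ [word] else arr) []) ↔ w ∈ text ∧ w ∈ S := by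
  rw [PySem.Set.mem_ofList, mem_filter_fold (fun x => x ∈ S)]
  simp

theorem mem_detect_keywords (text : List String) (w : String) :
    w ∈ detect_keywords text ↔ w ∈ text ∧ w ∈ pyKeywords := by
  unfold detect_keywords; exact mem_detect_if pyKeywords text w

theorem mem_detect_operators (text : List String) (w : String) :
    w ∈ detect_operators text ↔ w ∈ text ∧ w ∈ pyOperators := by
  unfold detect_operators; exact mem_detect_if pyOperators text w

theorem mem_detect_delimiters (text : List String) (w : String) :
    w ∈ detect_delimiters text ↔ w ∈ text ∧ w ∈ pyDelimiters := by
  unfold detect_delimiters; exact mem_detect_if pyDelimiters text w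

theorem out_fold_congr (P Q : String → Prop) [DecidablePred P] [DecidablePred Q]
    (l : List String) : ∀ (acc : List String), (∀ w ∈ l, P w ↔ Q w) →
    l.foldl (fun arr x => if P x then arr else arr ++ [x]) acc
      = l.foldl (fun arr x => if Q x then arr else arr ++ [x]) acc := by
  induction l with
  | nil => intro acc _; rfl
  | cons x l' ih =>
    intro acc h
    simp only [List.foldl_cons]
    have hx := h x (List.mem_cons_self ..)
    by_cases hp : P x
    · rw [if_pos hp, if_pos (hx.mp hp)]
      exact ih acc (fun w hw => h w (List.mem_cons_of_mem _ hw))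
    · rw [if_neg hp, if_neg (fun hq => hp (hx.mpr hq))]
      exact ih _ (fun w hw => h w (List.mem_cons_of_mem _ hw))

-- ===== VERDICT (by name: the statement is the Claim_ definition above) =====
set_option maxRecDepth 8192 in
theorem detect_identifiers_spec : Claim_equal_detect_identifiers := by
  intro text _
  unfold Spec_detect_identifiers detect_identifiers detect_identifiers_alt
  refine out_fold_congr _ _ text [] ?_
  intro w hw
  simp only [List.mem_append]
  rw [mem_detect_keywords, mem_detect_operators, mem_detect_delimiters,
    mem_detect_num, detect_comment_mem, mem_mA_iff, bfold_mem]
  simp only [hw, true_and, PySem.Set.empty, List.not_mem_nil, false_or]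
  tauto
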